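-- pv_equiv track=rewrite | github.com/qixua/file-shortener | source/script.py | path_shortener
-- ===== SOURCE A (Python) =====
-- def path_shortener(path: str):
--     labels = path.split("/")
--     dir_names = []
--     filename = ""
--     simple_path = ""
--
--     for l in labels:
--         label_is_file_name = "." in l
--
--         if l:
--             if not label_is_file_name:
--                 dir_names.append(l)
--             else:
--                 filename = l
--
--     if not labels[0] == dir_names[0]:
--         simple_path += path[0]
--
--     for i, d in enumerate(dir_names):
--         i_is_last_directory = i == len(dir_names) - 1
--
--         if i == 0:
--             simple_path += d[0]
--         elif i_is_last_directory:
--             simple_path += f"/{d[0]}/"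
--         else:
--             simple_path += f"/{d[0]}"
--
--     simple_path += filename
--
--     return simple_path
-- ===== SOURCE B (Python) =====
-- def path_shortener(path: str):
--     labels = path.split("/")
--
--     def go(ls):
--         # back-to-front recursion: (initials joined by '/', dir count, first dir or None, last dotted label or "")
--         if not ls:
--             return ("", 0, None, "")
--         body, n, first_dir, fn = go(ls[1:])
--         l = ls[0]
--         if l and "." not in l:
--             return (l[0] + ("/" + body if n else ""), n + 1, l, fn)
--         if l and "." in l and not fn:
--             fn = l
--         return (body, n, first_dir, fn)
--
--     body, n, first_dir, fn = go(labels)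
--     prefix = path[0] if labels[0] != first_dir else ""
--     return prefix + body + ("/" if n > 1 else "") + fn
-- ===== Notes on version B (the rewrite author's own statement) =====
-- stated objective: alternative
-- what changed: B replaces A's two iterative passes (a stateful classification loop plus an index-based enumerate loop with first/middle/last branching) by one structural recursion over the labels that builds the joined-initials body back-to-front while simultaneously returning the dir count, the first directory and the last dotted label.
import Mathlib
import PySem

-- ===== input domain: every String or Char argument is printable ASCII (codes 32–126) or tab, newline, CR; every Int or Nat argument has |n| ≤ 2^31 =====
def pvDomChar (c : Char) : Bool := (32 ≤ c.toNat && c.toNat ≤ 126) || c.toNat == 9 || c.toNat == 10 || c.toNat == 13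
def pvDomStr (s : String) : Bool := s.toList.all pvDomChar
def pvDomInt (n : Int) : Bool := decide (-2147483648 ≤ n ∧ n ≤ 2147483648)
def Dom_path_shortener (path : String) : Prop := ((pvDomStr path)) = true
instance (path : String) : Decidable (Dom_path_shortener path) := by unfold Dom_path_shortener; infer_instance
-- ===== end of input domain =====

-- B is an alternative decomposition: one structural recursion over the labels building the
-- joined-initials body back-to-front (also returning dir count, first dir, last dotted label),
-- instead of A's two iterative passes with index-based first/middle/last branching.
-- Equivalence of return values is proved on Pre_ (at least one directory label; elsewhere A raises).

-- shared accessor: Python's s[0] as a 1-character string ([] only where Python would raise, excluded by Pre_)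
def pvHead1 (d : List Char) : List Char := (PySem.List.pyGet? d 0).elim [] (fun c => [c])

-- ===== PORT A =====
def path_shortener (path : String) : String :=
  let labels := PySem.Chars.splitOn path.toList ['/']
  let st := labels.foldl (fun (acc : List (List Char) × List Char) l =>
      if l ≠ [] then
        if ¬ (PySem.Chars.isIn ['.'] l = true) then (acc.1 ++ [l], acc.2)
        else (acc.1, l)
      else acc) ([], [])
  let dirNames := st.1
  let filename := st.2
  let sp0 : List Char :=
    if ¬ (PySem.List.pyGet? labels 0 = PySem.List.pyGet? dirNames 0)
    then pvHead1 path.toList else []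
  let sp1 := (PySem.List.enumerate dirNames).foldl (fun sp (p : Int × List Char) =>
      if p.1 = 0 then sp ++ pvHead1 p.2
      else if p.1 = (dirNames.length : Int) - 1 then sp ++ ['/'] ++ pvHead1 p.2 ++ ['/']
      else sp ++ ['/'] ++ pvHead1 p.2) sp0
  String.ofList (sp1 ++ filename)

-- ===== PORT B =====
-- B's recursive helper go: returns (body, dir count, first dir or None, last dotted label or "")
def pvGo : List (List Char) → List Char × Int × Option (List Char) × List Char
  | [] => ([], 0, none, [])
  | l :: ls =>
    let r := pvGo ls
    if l ≠ [] ∧ ¬ (PySem.Chars.isIn ['.'] l = true) then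
      (pvHead1 l ++ (if r.2.1 ≠ 0 then '/' :: r.1 else []), r.2.1 + 1, some l, r.2.2.2)
    else if l ≠ [] ∧ PySem.Chars.isIn ['.'] l = true ∧ r.2.2.2 = [] then
      (r.1, r.2.1, r.2.2.1, l)
    else r

def path_shortener_alt (path : String) : String :=
  let labels := PySem.Chars.splitOn path.toList ['/']
  let r := pvGo labels
  let pre : List Char :=
    if PySem.List.pyGet? labels 0 = r.2.2.1 then []
    else pvHead1 path.toList
  String.ofList (pre ++ r.1 ++ (if 1 < r.2.1 then ['/'] else []) ++ r.2.2.2)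

-- ===== PRECONDITION & SPEC =====
-- Pre_ excludes exactly the paths with no directory label (no nonempty '/'-separated label free of '.'):
-- there Python A raises IndexError at dir_names[0].
def Pre_path_shortener (path : String) : Prop :=
  (PySem.Chars.splitOn path.toList ['/']).any
    (fun l => decide (l ≠ []) && !(PySem.Chars.isIn ['.'] l)) = true
instance (path : String) : Decidable (Pre_path_shortener path) := by
  unfold Pre_path_shortener; infer_instance
def pvWitness_path_shortener : String := "usr/share/a.txt"
def Spec_path_shortener (path : String) (out : String) : Prop := out = path_shortener_alt path
instance (path : String) (out : String) : Decidable (Spec_path_shortener path out) := by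
  unfold Spec_path_shortener; infer_instance

-- ===== CLAIM (what is proved, stated in full; the proofs are below) =====
def Claim_equal_path_shortener : Prop := ∀ (path : String), Dom_path_shortener path → Pre_path_shortener path → Spec_path_shortener path (path_shortener path)

-- ===== LEMMAS AND PROOFS =====

-- the directory / file classification predicates
def pvDirp (l : List Char) : Bool := decide (l ≠ []) && !(PySem.Chars.isIn ['.'] l)
def pvFilep (l : List Char) : Bool := decide (l ≠ []) && PySem.Chars.isIn ['.'] l

-- A's classification loop is the pair (filtered directory labels, last file label or the default)
theorem pvLoop1 (ls : List (List Char)) (a : List (List Char)) (fn : List Char) :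
    ls.foldl (fun (acc : List (List Char) × List Char) l =>
      if l ≠ [] then
        if ¬ (PySem.Chars.isIn ['.'] l = true) then (acc.1 ++ [l], acc.2)
        else (acc.1, l)
      else acc) (a, fn)
    = (a ++ ls.filter pvDirp, (ls.filter pvFilep).getLastD fn) := by
  induction ls generalizing a fn with
  | nil => simp
  | cons l rest ih =>
    rw [List.foldl_cons]
    by_cases h0 : l = []
    · rw [if_neg (by simp [h0]), ih]
      simp [h0, pvDirp, pvFilep]
    · by_cases h1 : PySem.Chars.isIn ['.'] l = true
      · rw [if_pos h0, if_neg (by simp [h1]), ih,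
            List.filter_cons_of_neg (by simp [pvDirp, h1]),
            List.filter_cons_of_pos (by simp [pvFilep, h0, h1]), List.getLastD_cons]
      · rw [if_pos h0, if_pos (by simp [h1]), ih,
            List.filter_cons_of_pos (by simp [pvDirp, h0, h1]),
            List.filter_cons_of_neg (by simp [pvFilep, h1])]
        simp

-- join with '/' of a nonempty list = head ++ "/"-prefixed tail
theorem pvJoin_eq (x : List Char) (l : List (List Char)) :
    PySem.Chars.join ['/'] (x :: l) = x ++ l.flatMap (fun y => '/' :: y) := by
  induction l generalizing x with
  | nil => simp [PySem.Chars.join_singleton]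
  | cons y rest ih => rw [PySem.Chars.join_cons_cons, ih]; simp

-- A's tail of the enumerate loop (indices ≥ 1): each element adds "/" + initial, the last adds a trailing "/"
theorem pvTailLoop (rest : List (List Char)) (s : Int) (n : Nat) (sp : List Char)
    (hs : 1 ≤ s) (hrest : rest ≠ []) (hn : s + rest.length = n) :
    (PySem.List.enumerate rest s).foldl (fun sp (p : Int × List Char) =>
      if p.1 = 0 then sp ++ pvHead1 p.2
      else if p.1 = (n : Int) - 1 then sp ++ ['/'] ++ pvHead1 p.2 ++ ['/']
      else sp ++ ['/'] ++ pvHead1 p.2) sp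
    = sp ++ rest.flatMap (fun d => '/' :: pvHead1 d) ++ ['/'] := by
  induction rest generalizing s sp with
  | nil => exact absurd rfl hrest
  | cons r rest' ih =>
    rw [PySem.List.enumerate_cons, List.foldl_cons]
    by_cases hr : rest' = []
    · subst hr
      have hsn : s = (n : Int) - 1 := by simp at hn; omega
      have hs0 : ¬ s = 0 := by omega
      rw [if_neg hs0, if_pos hsn]
      simp
    · have hs0 : ¬ s = 0 := by omega
      have hsn : ¬ s = (n : Int) - 1 := by
        have : rest'.length > 0 := List.length_pos_iff.mpr hr
        simp at hn; omega
      rw [if_neg hs0, if_neg hsn]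
      rw [ih (s + 1) _ (by omega) hr (by simp at hn ⊢; omega)]
      simp

-- the full enumerate loop = join of initials + conditional trailing slash
theorem pvEnumLoop (ds : List (List Char)) (sp0 : List Char) :
    (PySem.List.enumerate ds).foldl (fun sp (p : Int × List Char) =>
      if p.1 = 0 then sp ++ pvHead1 p.2
      else if p.1 = (ds.length : Int) - 1 then sp ++ ['/'] ++ pvHead1 p.2 ++ ['/']
      else sp ++ ['/'] ++ pvHead1 p.2) sp0
    = sp0 ++ PySem.Chars.join ['/'] (ds.map pvHead1)
        ++ (if 1 < ds.length then ['/'] else []) := by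
  cases ds with
  | nil => simp [PySem.Chars.join, List.intercalate]
  | cons d rest =>
    rw [PySem.List.enumerate_cons, List.foldl_cons]
    simp only [List.map_cons]
    rw [pvJoin_eq]
    by_cases hr : rest = []
    · subst hr; simp
    · have h1 : 1 < (d :: rest).length := by
        have : rest.length > 0 := List.length_pos_iff.mpr hr
        simp; omega
      rw [if_pos trivial]
      simp only [zero_add]
      rw [pvTailLoop rest 1 (d :: rest).length (sp0 ++ pvHead1 d) le_rfl hr (by simp; omega)]
      simp [List.flatMap_map, hr]

-- getLastD of a nonempty list does not depend on the default
theorem pvLastD_default {α : Type} (xs : List α) (h : xs ≠ []) (d d' : α) :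
    xs.getLastD d = xs.getLastD d' := by
  cases xs with
  | nil => exact absurd rfl h
  | cons a t => rw [List.getLastD_cons, List.getLastD_cons]

-- getLastD [] of a nonempty list of nonempty lists is nonempty
theorem pvLastD_ne (xs : List (List Char)) (hall : ∀ x ∈ xs, x ≠ []) (hne : xs ≠ []) :
    xs.getLastD [] ≠ [] := by
  induction xs with
  | nil => exact absurd rfl hne
  | cons a t ih =>
    rw [List.getLastD_cons]
    cases t with
    | nil => simpa using hall a (by simp)
    | cons b u =>
      have h2 := ih (fun x hx => hall x (by simp [hx])) (by simp)
      rw [List.getLastD_cons] at h2 ⊢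
      exact h2

-- every file label kept by the filter is nonempty, so its getLastD [] is [] iff there are none
theorem pvFilesLastD (ls : List (List Char)) :
    (ls.filter pvFilep).getLastD [] = [] ↔ ls.filter pvFilep = [] := by
  constructor
  · intro h
    by_contra hne
    refine pvLastD_ne (ls.filter pvFilep) (fun x hx => ?_) hne h
    have hp := List.of_mem_filter hx
    unfold pvFilep at hp
    rw [Bool.and_eq_true, decide_eq_true_iff] at hp
    exact hp.1
  · intro h; rw [h]; rfl

-- B's recursion computes (join of dir initials, dir count, first dir, last file label)
theorem pvGoSpec (ls : List (List Char)) :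
    pvGo ls = (PySem.Chars.join ['/'] ((ls.filter pvDirp).map pvHead1),
               ((ls.filter pvDirp).length : Int),
               (ls.filter pvDirp).head?,
               (ls.filter pvFilep).getLastD []) := by
  induction ls with
  | nil => simp [pvGo, PySem.Chars.join, List.intercalate]
  | cons l rest ih =>
    unfold pvGo
    rw [ih]
    simp only []
    by_cases hd : pvDirp l = true
    · have hd' := hd
      unfold pvDirp at hd'
      rw [Bool.and_eq_true, decide_eq_true_iff, Bool.not_eq_true'] at hd'
      have h0 : l ≠ [] := hd'.1
      have h1 : ¬ (PySem.Chars.isIn ['.'] l = true) := by rw [hd'.2]; simp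
      rw [if_pos ⟨h0, h1⟩, List.filter_cons_of_pos hd,
          List.filter_cons_of_neg (by unfold pvFilep; simp [h1])]
      cases hrest : rest.filter pvDirp with
      | nil => simp [PySem.Chars.join_singleton]
      | cons y t =>
        have hlen : (((y :: t).length : Int)) ≠ 0 := by
          have : (y :: t).length = t.length + 1 := rfl
          simp [this]; omega
        rw [if_pos hlen]
        simp [PySem.Chars.join_cons_cons]
    · rw [if_neg (by
        intro h
        exact hd (by unfold pvDirp; rw [Bool.and_eq_true, decide_eq_true_iff]; exact ⟨h.1, by simp [h.2]⟩))]
      by_cases hf : pvFilep l = true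
      · have h0 : l ≠ [] := by
          unfold pvFilep at hf; rw [Bool.and_eq_true, decide_eq_true_iff] at hf; exact hf.1
        have h1 : PySem.Chars.isIn ['.'] l = true := by
          unfold pvFilep at hf; rw [Bool.and_eq_true] at hf; exact hf.2
        rw [List.filter_cons_of_neg (by unfold pvDirp; simp [h1]),
            List.filter_cons_of_pos hf]
        by_cases hfn : (rest.filter pvFilep).getLastD [] = []
        · have hnil := (pvFilesLastD rest).mp hfn
          rw [if_pos ⟨h0, h1, hfn⟩, hnil]
          simp
        · rw [if_neg (by intro h; exact hfn h.2.2)]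
          have hne : rest.filter pvFilep ≠ [] := by
            intro h; exact hfn (by rw [h]; rfl)
          rw [List.getLastD_cons, pvLastD_default _ hne l []]
      · have h0 : l = [] := by
          by_contra h0
          by_cases h1 : PySem.Chars.isIn ['.'] l = true
          · exact hf (by unfold pvFilep; rw [Bool.and_eq_true, decide_eq_true_iff]; exact ⟨h0, h1⟩)
          · exact hd (by unfold pvDirp; rw [Bool.and_eq_true, decide_eq_true_iff]; exact ⟨h0, by simp [h1]⟩)
        rw [if_neg (fun h => h.1 h0),
            List.filter_cons_of_neg (by unfold pvDirp; simp [h0]),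
            List.filter_cons_of_neg (by unfold pvFilep; simp [h0])]

-- pyGet? at 0 is head?
theorem pvGet0 {α : Type} (xs : List α) : PySem.List.pyGet? xs 0 = xs.head? := by
  cases xs <;> simp [PySem.List.pyGet?, PySem.List.pyIdx?]

-- ===== VERDICT (by name: the statement is the Claim_ definition above) =====
theorem path_shortener_spec : Claim_equal_path_shortener := by
  intro path _ hpre
  unfold Spec_path_shortener path_shortener path_shortener_alt
  simp only [pvLoop1, pvGoSpec, List.nil_append]
  rw [pvEnumLoop]
  have hdirs : (PySem.Chars.splitOn path.toList ['/']).filter pvDirp ≠ [] := by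
    unfold Pre_path_shortener at hpre
    rw [List.any_eq_true] at hpre
    obtain ⟨x, hx, hpx⟩ := hpre
    intro h
    exact (List.filter_eq_nil_iff.mp h) x hx hpx
  obtain ⟨d0, t, hdt⟩ := List.exists_cons_of_ne_nil hdirs
  rw [hdt]
  simp only [List.head?_cons, pvGet0]
  have hlen : (1 < (d0 :: t).length) ↔ (1 < ((d0 :: t).length : Int)) := by
    constructor <;> intro h
    · exact_mod_cast h
    · exact_mod_cast h
  by_cases hc : (PySem.Chars.splitOn path.toList ['/']).head? = some d0
  · rw [if_neg (by simp [hc]), if_pos hc]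
    by_cases h2 : 1 < (d0 :: t).length
    · rw [if_pos h2, if_pos (hlen.mp h2)]
    · rw [if_neg h2, if_neg (fun h => h2 (hlen.mpr h))]
  · rw [if_pos (by simp [hc]), if_neg hc]
    by_cases h2 : 1 < (d0 :: t).length
    · rw [if_pos h2, if_pos (hlen.mp h2)]
    · rw [if_neg h2, if_neg (fun h => h2 (hlen.mpr h))]
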